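-- pv_equiv track=rewrite | github.com/fireboy-bot/my_bots | handlers/profile.py | get_level_info
-- ===== SOURCE A (Python) =====
-- def get_level_info(total_score: int):
--     """Возвращает уровень и звание по очкам"""
--     levels = [
--         (0, 1, "Ученик"),
--         (500, 6, "Исследователь"),
--         (2000, 11, "Матемаг"),
--         (5000, 16, "Хранитель Чисел"),
--         (12000, 21, "Владыка Числяндии")
--     ]
--
--     for score, level_num, title in reversed(levels):
--         if total_score >= score:
--             return level_num, title
--
--     return 1, "Ученик"
-- ===== SOURCE B (Python) =====
-- def get_level_info(total_score: int):
--     """Возвращает уровень и звание по очкам"""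
--     thresholds = [0, 500, 2000, 5000, 12000]
--     results = [
--         (1, "Ученик"),
--         (6, "Исследователь"),
--         (11, "Матемаг"),
--         (16, "Хранитель Чисел"),
--         (21, "Владыка Числяндии"),
--     ]
--     # binary search: number of thresholds <= total_score (bisect_right by hand)
--     lo, hi = 0, len(thresholds)
--     while lo < hi:
--         mid = (lo + hi) // 2
--         if total_score >= thresholds[mid]:
--             lo = mid + 1
--         else:
--             hi = mid
--     return results[max(lo, 1) - 1]
-- ===== Notes on version B (the rewrite author's own statement) =====
-- stated objective: alternative
-- what changed: Replaces the reversed linear scan over (threshold, level, title) triples with a hand-written bisect_right binary search over an ascending threshold list indexing a parallel results table (index clamped so negative scores give level 1).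
import Mathlib
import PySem

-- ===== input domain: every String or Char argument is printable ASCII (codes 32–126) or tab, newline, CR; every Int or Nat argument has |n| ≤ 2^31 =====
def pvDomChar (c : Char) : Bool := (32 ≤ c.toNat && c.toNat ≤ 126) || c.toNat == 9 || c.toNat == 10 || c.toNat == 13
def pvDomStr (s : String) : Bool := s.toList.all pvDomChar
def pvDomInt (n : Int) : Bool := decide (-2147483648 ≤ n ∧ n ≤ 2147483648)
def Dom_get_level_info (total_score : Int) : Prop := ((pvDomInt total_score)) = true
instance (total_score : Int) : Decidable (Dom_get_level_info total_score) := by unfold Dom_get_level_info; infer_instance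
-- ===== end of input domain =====

-- B replaces A's reversed linear scan with a hand-written bisect_right binary search
-- into parallel threshold/result tables (alternative structure; return value only).

-- ===== PORT A =====
def pvLevelsA : List (Int × Int × String) :=
  [(0, 1, "Ученик"), (500, 6, "Исследователь"), (2000, 11, "Матемаг"),
   (5000, 16, "Хранитель Чисел"), (12000, 21, "Владыка Числяндии")]

-- the 'for … in reversed(levels): if … return' loop, with the fall-through return
def pvLoopA (ts : Int) : List (Int × Int × String) → Int × String
  | [] => (1, "Ученик")
  | (score, level_num, title) :: rest =>
      if ts ≥ score then (level_num, title) else pvLoopA ts rest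

def get_level_info (total_score : Int) : Int × String :=
  pvLoopA total_score pvLevelsA.reverse

-- ===== PORT B =====
def pvThresholdsB : List Int := [0, 500, 2000, 5000, 12000]

def pvResultsB : List (Int × String) :=
  [(1, "Ученик"), (6, "Исследователь"), (11, "Матемаг"),
   (16, "Хранитель Чисел"), (21, "Владыка Числяндии")]

-- the 'while lo < hi' bisect loop; thresholds[mid] is always in range, so getD is exact
def pvBisect (ts : Int) (lo hi : Nat) : Nat :=
  if lo < hi then
    let mid := (lo + hi) / 2
    if ts ≥ pvThresholdsB.getD mid 0 then pvBisect ts (mid + 1) hi else pvBisect ts lo mid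
  else lo
termination_by hi - lo
decreasing_by all_goals omega

def get_level_info_alt (total_score : Int) : Int × String :=
  let lo := pvBisect total_score 0 pvThresholdsB.length
  pvResultsB.getD (max lo 1 - 1) (1, "Ученик")

-- ===== PRECONDITION & SPEC =====
def Spec_get_level_info (total_score : Int) (out : Int × String) : Prop := out = get_level_info_alt total_score
instance (total_score : Int) (out : Int × String) : Decidable (Spec_get_level_info total_score out) := by unfold Spec_get_level_info; infer_instance

-- ===== CLAIM (what is proved, stated in full; the proofs are below) =====
def Claim_equal_get_level_info : Prop := ∀ (total_score : Int), Dom_get_level_info total_score → Spec_get_level_info total_score (get_level_info total_score)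

-- ===== LEMMAS AND PROOFS =====

-- ===== VERDICT (by name: the statement is the Claim_ definition above) =====
theorem get_level_info_spec : Claim_equal_get_level_info := by
  intro ts _
  unfold Spec_get_level_info get_level_info get_level_info_alt
  simp only [pvLevelsA, pvThresholdsB, pvResultsB, List.reverse, List.length]
  by_cases h5 : ts >= 12000
  · simp [pvLoopA, pvBisect, pvThresholdsB,
      show (2000:Int) <= ts by omega, show (12000:Int) <= ts by omega]
  · by_cases h4 : ts >= 5000
    · simp [pvLoopA, pvBisect, pvThresholdsB,
        show (2000:Int) <= ts by omega, show (5000:Int) <= ts by omega,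
        show ¬ (12000:Int) <= ts by omega]
    · by_cases h3 : ts >= 2000
      · simp [pvLoopA, pvBisect, pvThresholdsB,
          show (2000:Int) <= ts by omega, show ¬ (5000:Int) <= ts by omega,
          show ¬ (12000:Int) <= ts by omega]
      · by_cases h2 : ts >= 500
        · simp [pvLoopA, pvBisect, pvThresholdsB,
            show (500:Int) <= ts by omega, show ¬ (2000:Int) <= ts by omega,
            show ¬ (5000:Int) <= ts by omega, show ¬ (12000:Int) <= ts by omega]
        · by_cases h1 : ts >= 0
          · simp [pvLoopA, pvBisect, pvThresholdsB,
              show (0:Int) <= ts by omega, show ¬ (500:Int) <= ts by omega,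
              show ¬ (2000:Int) <= ts by omega, show ¬ (5000:Int) <= ts by omega,
              show ¬ (12000:Int) <= ts by omega]
          · simp [pvLoopA, pvBisect, pvThresholdsB,
              show ¬ (0:Int) <= ts by omega, show ¬ (500:Int) <= ts by omega,
              show ¬ (2000:Int) <= ts by omega, show ¬ (5000:Int) <= ts by omega,
              show ¬ (12000:Int) <= ts by omega]
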